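-- pv_equiv track=rewrite | github.com/SemirBaldzhiev/FMI | Python/lab01/task8.py | find_shortest_and_longest_words
-- ===== SOURCE A (Python) =====
-- import math
--
-- def find_shortest_and_longest_words(words, letter):
--     max = -math.inf
--     min = math.inf
--     shortest = ""
--     longest = ""
--
--     for word in words:
--         if word[0] == letter:
--             curr_len = len(word)
--             if curr_len > max:
--                 max = curr_len
--                 longest = word
--             if curr_len < min:
--                 min = curr_len
--                 shortest = word
--
--     return shortest, longest
-- ===== SOURCE B (Python) =====
-- def find_shortest_and_longest_words(words, letter):
--     filtered = [w for w in words if w[0] == letter]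
--     if not filtered:
--         return "", ""
--     return min(filtered, key=len), max(filtered, key=len)
-- ===== Notes on version B (the rewrite author's own statement) =====
-- stated objective: simpler
-- what changed: Replaces the four-variable sentinel loop (running min/max lengths initialised to +/-inf) by filtering the matching words once and taking min/max with key=len, whose first-extremal tie rule reproduces A's strict-comparison first-seen behaviour.
import Mathlib
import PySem

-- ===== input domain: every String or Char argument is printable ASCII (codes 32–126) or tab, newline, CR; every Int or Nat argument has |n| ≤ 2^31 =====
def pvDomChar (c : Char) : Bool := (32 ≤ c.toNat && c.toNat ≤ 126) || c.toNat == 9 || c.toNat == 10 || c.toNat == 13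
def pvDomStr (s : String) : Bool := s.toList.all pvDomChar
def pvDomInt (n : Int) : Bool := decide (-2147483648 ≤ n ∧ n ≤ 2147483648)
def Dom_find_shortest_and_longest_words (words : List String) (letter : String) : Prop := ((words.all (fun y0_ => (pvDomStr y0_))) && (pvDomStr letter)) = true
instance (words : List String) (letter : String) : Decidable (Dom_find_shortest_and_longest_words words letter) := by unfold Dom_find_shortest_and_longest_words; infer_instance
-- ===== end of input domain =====

-- ===== PORT A =====
-- B filters the matching words once and takes min/max with key=len instead of A's
-- four-variable sentinel loop; equally fast, simpler decomposition (objective: simpler).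

-- shared condition: Python's `word[0] == letter` (a one-char string compared to letter)
def pvFirstIs (letter w : String) : Bool :=
  match PySem.Str.pyGet? w 0 with
  | some c => letter.toList == [c]
  | none => false        -- Python raises IndexError here (empty word); excluded by Pre_

-- `curr_len > max` with max possibly -inf (none)
def pvGtOpt (v : Int) (mx : Option Int) : Bool :=
  match mx with | none => true | some m => decide (m < v)

-- `curr_len < min` with min possibly +inf (none)
def pvLtOpt (v : Int) (mn : Option Int) : Bool :=
  match mn with | none => true | some m => decide (v < m)

def find_shortest_and_longest_words (words : List String) (letter : String) : String × String :=
  let r := words.foldl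
    (fun (st : Option Int × Option Int × String × String) word =>
      if pvFirstIs letter word then
        let currLen := PySem.Str.len word
        let p1 := if pvGtOpt currLen st.1 then (some currLen, word) else (st.1, st.2.2.2)
        let p2 := if pvLtOpt currLen st.2.1 then (some currLen, word) else (st.2.1, st.2.2.1)
        (p1.1, p2.1, p2.2, p1.2)
      else st)
    (none, none, "", "")
  (r.2.2.1, r.2.2.2)

-- ===== PORT B =====
def find_shortest_and_longest_words_alt (words : List String) (letter : String) : String × String :=
  let filtered := words.filter (fun w => pvFirstIs letter w)
  if filtered.isEmpty then ("", "")
  else ((PySem.List.min? filtered PySem.Str.len).getD "",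
        (PySem.List.max? filtered PySem.Str.len).getD "")

-- ===== PRECONDITION & SPEC =====
-- Pre_ excludes lists containing an empty word: there Python A raises IndexError on word[0]
-- (and B raises identically).
def Pre_find_shortest_and_longest_words (words : List String) (letter : String) : Prop :=
  ∀ w ∈ words, w.toList ≠ []
instance (words : List String) (letter : String) : Decidable (Pre_find_shortest_and_longest_words words letter) := by unfold Pre_find_shortest_and_longest_words; infer_instance

def pvWitness_find_shortest_and_longest_words : List String × String := (["apple", "ant", "bee"], "a")
def Spec_find_shortest_and_longest_words (words : List String) (letter : String) (out : String × String) : Prop := out = find_shortest_and_longest_words_alt words letter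
instance (words : List String) (letter : String) (out : String × String) : Decidable (Spec_find_shortest_and_longest_words words letter out) := by unfold Spec_find_shortest_and_longest_words; infer_instance

-- ===== CLAIM (what is proved, stated in full; the proofs are below) =====
def Claim_equal_find_shortest_and_longest_words : Prop := ∀ (words : List String) (letter : String), Dom_find_shortest_and_longest_words words letter → Pre_find_shortest_and_longest_words words letter → Spec_find_shortest_and_longest_words words letter (find_shortest_and_longest_words words letter)

-- ===== LEMMAS AND PROOFS =====

-- A's loop body on matched words (the `if pvFirstIs` branch taken)
def pvStep (st : Option Int × Option Int × String × String) (word : String) :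
    Option Int × Option Int × String × String :=
  let currLen := PySem.Str.len word
  let p1 := if pvGtOpt currLen st.1 then (some currLen, word) else (st.1, st.2.2.2)
  let p2 := if pvLtOpt currLen st.2.1 then (some currLen, word) else (st.2.1, st.2.2.1)
  (p1.1, p2.1, p2.2, p1.2)

-- running first-min / first-max by length, seeded
def pvFoldMin (l : List String) (s : String) : String :=
  l.foldl (fun m w => if PySem.Str.len w < PySem.Str.len m then w else m) s
def pvFoldMax (l : List String) (x : String) : String :=
  l.foldl (fun m w => if PySem.Str.len m < PySem.Str.len w then w else m) x

lemma pvFoldMin_cons (w : String) (t : List String) (s : String) :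
    pvFoldMin (w :: t) s
      = pvFoldMin t (if PySem.Str.len w < PySem.Str.len s then w else s) := rfl

lemma pvFoldMax_cons (w : String) (t : List String) (x : String) :
    pvFoldMax (w :: t) x
      = pvFoldMax t (if PySem.Str.len x < PySem.Str.len w then w else x) := rfl

lemma pvStep_invariant : ∀ (l : List String) (s x : String),
    l.foldl pvStep (some (PySem.Str.len x), some (PySem.Str.len s), s, x)
      = (some (PySem.Str.len (pvFoldMax l x)), some (PySem.Str.len (pvFoldMin l s)),
         pvFoldMin l s, pvFoldMax l x) := by
  intro l
  induction l with
  | nil => intro s x; simp [pvFoldMin, pvFoldMax]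
  | cons w t ih =>
    intro s x
    rw [List.foldl_cons, pvFoldMin_cons, pvFoldMax_cons]
    by_cases h1 : PySem.Str.len x < PySem.Str.len w <;>
      by_cases h2 : PySem.Str.len w < PySem.Str.len s <;>
        simp only [pvStep, pvGtOpt, pvLtOpt, h1, h2, decide_true, decide_false,
          Bool.false_eq_true, if_true, if_false, ite_true, ite_false] <;>
        rw [ih]

lemma pvFoldA_eq : ∀ (l : List String),
    l.foldl pvStep (none, none, "", "")
      = match l with
        | [] => (none, none, "", "")
        | w :: t => (some (PySem.Str.len (pvFoldMax t w)), some (PySem.Str.len (pvFoldMin t w)),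
                     pvFoldMin t w, pvFoldMax t w) := by
  intro l
  cases l with
  | nil => rfl
  | cons w t =>
    simp only [List.foldl_cons]
    have : pvStep (none, none, "", "") w
        = (some (PySem.Str.len w), some (PySem.Str.len w), w, w) := by
      simp [pvStep, pvGtOpt, pvLtOpt]
    rw [this, pvStep_invariant]

lemma pvMin?_cons_cons (w y : String) (t : List String) :
    PySem.List.min? (w :: y :: t) PySem.Str.len
      = PySem.List.min? ((if PySem.Str.len y < PySem.Str.len w then y else w) :: t)
          PySem.Str.len := by
  by_cases h : y.length < w.length <;>
    simp [PySem.List.min?, List.foldl_cons, PySem.Str.len, h]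

lemma pvMax?_cons_cons (w y : String) (t : List String) :
    PySem.List.max? (w :: y :: t) PySem.Str.len
      = PySem.List.max? ((if PySem.Str.len w < PySem.Str.len y then y else w) :: t)
          PySem.Str.len := by
  by_cases h : w.length < y.length <;>
    simp [PySem.List.max?, List.foldl_cons, PySem.Str.len, h]

lemma pvMin?_cons : ∀ (t : List String) (w : String),
    PySem.List.min? (w :: t) PySem.Str.len = some (pvFoldMin t w) := by
  intro t
  induction t with
  | nil => intro w; rfl
  | cons y t ih =>
    intro w
    rw [pvMin?_cons_cons, ih]
    simp only [pvFoldMin, List.foldl_cons]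

lemma pvMax?_cons : ∀ (t : List String) (w : String),
    PySem.List.max? (w :: t) PySem.Str.len = some (pvFoldMax t w) := by
  intro t
  induction t with
  | nil => intro w; rfl
  | cons y t ih =>
    intro w
    rw [pvMax?_cons_cons, ih]
    simp only [pvFoldMax, List.foldl_cons]

-- ===== VERDICT (by name: the statement is the Claim_ definition above) =====
theorem find_shortest_and_longest_words_spec : Claim_equal_find_shortest_and_longest_words := by
  intro words letter _ _
  unfold Spec_find_shortest_and_longest_words
  unfold find_shortest_and_longest_words find_shortest_and_longest_words_alt
  have hfold : words.foldl
      (fun (st : Option Int × Option Int × String × String) word =>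
        if pvFirstIs letter word then
          let currLen := PySem.Str.len word
          let p1 := if pvGtOpt currLen st.1 then (some currLen, word) else (st.1, st.2.2.2)
          let p2 := if pvLtOpt currLen st.2.1 then (some currLen, word) else (st.2.1, st.2.2.1)
          (p1.1, p2.1, p2.2, p1.2)
        else st)
      (none, none, "", "")
      = (words.filter (fun w => pvFirstIs letter w)).foldl pvStep (none, none, "", "") := by
    rw [List.foldl_filter]
    rfl
  rw [hfold, pvFoldA_eq]
  cases h : words.filter (fun w => pvFirstIs letter w) with
  | nil => simp
  | cons w t => simp [pvMin?_cons, pvMax?_cons]
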